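-- pv_equiv track=rewrite | github.com/clee7/pandemaniac | pandemaniac.py | highest_degree_strategy
-- ===== SOURCE A (Python) =====
-- def highest_degree_strategy(graph, num_seeds, num_rounds):
--     highest_degree = []
--     i = 0
--     for k in sorted(graph, key=lambda k: len(graph[k]), reverse=True):
--         highest_degree.append(k)
--         i += 1
--         if i >= num_seeds:
--             break
--     return highest_degree * num_rounds
-- ===== SOURCE B (Python) =====
-- def highest_degree_strategy(graph, num_seeds, num_rounds):
--     # Bucket the nodes by degree, then scan degrees from highest down,
--     # instead of comparison-sorting the keys.
--     maxd = 0
--     for v in graph.values():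
--         maxd = max(maxd, len(v))
--     buckets = [[] for _ in range(maxd + 1)]
--     for k, v in graph.items():
--         buckets[len(v)].append(k)
--     result = []
--     done = False
--     for d in range(maxd, -1, -1):
--         for k in buckets[d]:
--             result.append(k)
--             if len(result) >= num_seeds:
--                 done = True
--                 break
--         if done:
--             break
--     return result * num_rounds
-- ===== Notes on version B (the rewrite author's own statement) =====
-- stated objective: alternative
-- what changed: Replaces the stable descending comparison sort of the keys by a counting/bucket pass: nodes are distributed into degree-indexed buckets in dict order and the buckets are scanned from the highest degree down until num_seeds nodes are collected.
import Mathlib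
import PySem

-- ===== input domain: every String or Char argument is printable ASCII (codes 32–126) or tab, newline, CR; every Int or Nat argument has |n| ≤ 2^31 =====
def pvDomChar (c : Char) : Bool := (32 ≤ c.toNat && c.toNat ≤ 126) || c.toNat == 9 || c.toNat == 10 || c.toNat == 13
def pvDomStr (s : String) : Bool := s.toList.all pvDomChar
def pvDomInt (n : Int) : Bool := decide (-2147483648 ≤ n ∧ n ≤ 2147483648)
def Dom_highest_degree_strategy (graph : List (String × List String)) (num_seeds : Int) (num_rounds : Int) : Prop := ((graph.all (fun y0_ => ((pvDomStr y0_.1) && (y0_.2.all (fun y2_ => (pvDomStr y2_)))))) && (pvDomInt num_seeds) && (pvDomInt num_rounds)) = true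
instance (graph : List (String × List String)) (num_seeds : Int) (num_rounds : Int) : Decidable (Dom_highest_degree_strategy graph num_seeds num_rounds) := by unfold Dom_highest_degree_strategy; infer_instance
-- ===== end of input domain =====

-- B replaces A's comparison sort of the keys by bucketing nodes by degree and scanning
-- degrees from highest down (objective: alternative algorithm, same observable result).

-- ===== PORT A =====
-- the for-loop with its counter and break
def hdsGoA (num_seeds : Int) : List String → List String → Int → List String
  | [], acc, _ => acc
  | k :: rest, acc, i =>
      let acc2 := acc ++ [k]
      let i2 := i + 1
      if i2 ≥ num_seeds then acc2 else hdsGoA num_seeds rest acc2 i2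

def highest_degree_strategy (graph : List (String × List String)) (num_seeds : Int) (num_rounds : Int) : List String :=
  let d := PySem.Dict.ofList graph
  let sortedKs := PySem.List.sorted d.keys (fun k => ((d.getD k []).length : Int)) true
  PySem.List.pyRepeat (hdsGoA num_seeds sortedKs [] 0) num_rounds

-- ===== PORT B =====
-- inner loop over one bucket: returns (result, done)
def hdsInner (num_seeds : Int) : List String → List String → List String × Bool
  | [], res => (res, false)
  | k :: rest, res =>
      let res2 := res ++ [k]
      if (res2.length : Int) ≥ num_seeds then (res2, true) else hdsInner num_seeds rest res2

-- outer loop over the degrees, highest first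
def hdsOuter (num_seeds : Int) (buckets : List (List String)) : List Int → List String → List String
  | [], res => res
  | dd :: rest, res =>
      let r := hdsInner num_seeds (PySem.List.pyGetD buckets dd []) res
      if r.2 then r.1 else hdsOuter num_seeds buckets rest r.1

def highest_degree_strategy_alt (graph : List (String × List String)) (num_seeds : Int) (num_rounds : Int) : List String :=
  let d := PySem.Dict.ofList graph
  let maxd : Int := d.values.foldl (fun acc v => max acc ((v.length : Int))) 0
  let buckets := d.items.foldl
    (fun bs p => bs.set p.2.length ((bs.getD p.2.length []) ++ [p.1]))
    (List.replicate (maxd + 1).toNat [])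
  PySem.List.pyRepeat (hdsOuter num_seeds buckets (PySem.List.pyRange maxd (-1) (-1)) []) num_rounds

-- ===== PRECONDITION & SPEC =====
def Spec_highest_degree_strategy (graph : List (String × List String)) (num_seeds : Int) (num_rounds : Int) (out : List String) : Prop := out = highest_degree_strategy_alt graph num_seeds num_rounds
instance (graph : List (String × List String)) (num_seeds : Int) (num_rounds : Int) (out : List String) : Decidable (Spec_highest_degree_strategy graph num_seeds num_rounds out) := by unfold Spec_highest_degree_strategy; infer_instance

-- ===== CLAIM (what is proved, stated in full; the proofs are below) =====
def Claim_equal_highest_degree_strategy : Prop := ∀ (graph : List (String × List String)) (num_seeds : Int) (num_rounds : Int), Dom_highest_degree_strategy graph num_seeds num_rounds → Spec_highest_degree_strategy graph num_seeds num_rounds (highest_degree_strategy graph num_seeds num_rounds)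

-- ===== LEMMAS AND PROOFS =====

-- inserting past a prefix none of whose elements triggers `before`
theorem hds_insertBy_append_left {α : Type} (before : α → α → Bool) (x : α)
    (as bs : List α) (h : ∀ y ∈ as, before x y = false) :
    PySem.List.insertBy before x (as ++ bs) = as ++ PySem.List.insertBy before x bs := by
  induction as with
  | nil => simp
  | cons a as ih =>
      have ha : before x a = false := h a (by simp)
      simp [PySem.List.insertBy, ha, ih (fun y hy => h y (by simp [hy]))]

-- inserting in front when the head (if any) triggers `before`
theorem hds_insertBy_front {α : Type} (before : α → α → Bool) (x : α)
    (l : List α) (h : ∀ y ∈ l, before x y = true) :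
    PySem.List.insertBy before x l = x :: l := by
  cases l with
  | nil => simp [PySem.List.insertBy]
  | cons a l => simp [PySem.List.insertBy, h a (by simp)]

-- stable descending insertion lands at the end of x's bucket
theorem hds_insertBy_flatMap {α : Type} (f : α → Int) (x : α) :
    ∀ (ds : List Int) (g : Int → List α),
    ds.Pairwise (· > ·) → f x ∈ ds → (∀ dd ∈ ds, ∀ y ∈ g dd, f y = dd) →
    PySem.List.insertBy (fun a b => decide (f b < f a)) x (ds.flatMap g)
      = ds.flatMap (fun dd => g dd ++ if dd = f x then [x] else []) := by
  intro ds
  induction ds with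
  | nil => intro g _ hmem _; simp at hmem
  | cons dd rest ih =>
      intro g hpw hmem hg
      have hgd : ∀ y ∈ g dd, f y = dd := hg dd (by simp)
      have hrest : ∀ d' ∈ rest, ∀ y ∈ g d', f y = d' := fun d' hd' => hg d' (by simp [hd'])
      have hpwr : rest.Pairwise (· > ·) := (List.pairwise_cons.mp hpw).2
      have hlt : ∀ d' ∈ rest, d' < dd := fun d' hd' => (List.pairwise_cons.mp hpw).1 d' hd'
      by_cases hfx : dd = f x
      · -- x belongs to the head bucket: append after g dd, in front of everything below
        have h1 : ∀ y ∈ g dd, (fun a b => decide (f b < f a)) x y = false := by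
          intro y hy; simp [hgd y hy, hfx]
        have h2 : ∀ y ∈ rest.flatMap g, (fun a b => decide (f b < f a)) x y = true := by
          intro y hy
          rcases List.mem_flatMap.mp hy with ⟨d', hd', hyg⟩
          have := hrest d' hd' y hyg
          have := hlt d' hd'
          simp; omega
        have hnot : f x ∉ rest := by intro hc; have := hlt _ hc; omega
        rw [List.flatMap_cons, hds_insertBy_append_left _ _ _ _ h1,
            hds_insertBy_front _ _ _ h2]
        have : rest.flatMap (fun d' => g d' ++ if d' = f x then [x] else [])
            = rest.flatMap g := by
          apply List.flatMap_congr  -- may not exist; fallback below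
          intro d' hd'
          have : d' ≠ f x := by intro hc; exact hnot (hc ▸ hd')
          simp [this]
        simp [List.flatMap_cons, hfx, this]
      · -- head bucket untouched, recurse
        have hmem' : f x ∈ rest := by
          rcases List.mem_cons.mp hmem with h | h
          · exact absurd h.symm hfx
          · exact h
        have h1 : ∀ y ∈ g dd, (fun a b => decide (f b < f a)) x y = false := by
          intro y hy
          have hy' := hgd y hy
          have : f x < dd := by
            have := hlt _ hmem'; omega
          simp [hy']; omega
        rw [List.flatMap_cons, hds_insertBy_append_left _ _ _ _ h1,
            ih g hpwr hmem' hrest]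
        simp [List.flatMap_cons, hfx]

theorem hds_pairwise_gt_pyRange_neg_one (a b : Int) :
    (PySem.List.pyRange a b (-1)).Pairwise (· > ·) := by
  rw [PySem.List.pyRange_neg_one_eq_reverse]
  rw [List.pairwise_reverse]
  exact PySem.List.pairwise_lt_pyRange_one _ _

-- Python's stable reverse sort of bounded nonnegative integer keys is
-- the concatenation of the key-buckets, highest key first.
theorem hds_sorted_eq_flatMap {α : Type} (f : α → Int) (Bd : Int) (_hB : 0 ≤ Bd) :
    ∀ (ks : List α), (∀ k ∈ ks, 0 ≤ f k ∧ f k ≤ Bd) →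
    PySem.List.sorted ks f true
      = (PySem.List.pyRange Bd (-1) (-1)).flatMap (fun dd => ks.filter (fun k => f k == dd)) := by
  intro ks
  induction ks using List.reverseRecOn with
  | nil =>
      intro _
      simp [PySem.List.sorted]
  | append_singleton ks x ih =>
      intro h
      have hks : ∀ k ∈ ks, 0 ≤ f k ∧ f k ≤ Bd := fun k hk => h k (by simp [hk])
      have hx : 0 ≤ f x ∧ f x ≤ Bd := h x (by simp)
      rw [PySem.List.sorted_rev_eq_foldl_insertBy, List.foldl_append]
      rw [← PySem.List.sorted_rev_eq_foldl_insertBy, ih hks]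
      simp only [List.foldl_cons, List.foldl_nil]
      rw [hds_insertBy_flatMap f x _ _
        (hds_pairwise_gt_pyRange_neg_one _ _)
        (PySem.List.mem_pyRange_neg_one.mpr (by omega))
        (by intro dd _ y hy; simpa using (List.mem_filter.mp hy).2)]
      apply List.flatMap_congr
      intro dd _
      rw [List.filter_append]
      congr 1
      by_cases hdd : dd = f x
      · subst hdd; simp
      · have hne : (f x == dd) = false := by
          simp only [beq_eq_false_iff_ne, ne_eq]
          exact fun h => hdd h.symm
        simp [hne, hdd]

-- the bucket-building fold, characterised
theorem hds_buckets_getD :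
    ∀ (items : List (String × List String)) (bs : List (List String)) (j : Nat),
    (∀ p ∈ items, p.2.length < bs.length) →
    (items.foldl (fun bs p => bs.set p.2.length ((bs.getD p.2.length []) ++ [p.1])) bs).getD j []
      = bs.getD j [] ++ (items.filter (fun p => p.2.length == j)).map (·.1) := by
  intro items
  induction items with
  | nil => intro bs j _; simp
  | cons p items ih =>
      intro bs j hlt
      have hp : p.2.length < bs.length := hlt p (by simp)
      have hrest : ∀ q ∈ items, q.2.length < (bs.set p.2.length ((bs.getD p.2.length []) ++ [p.1])).length := by
        intro q hq; simpa [List.length_set] using hlt q (by simp [hq])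
      simp only [List.foldl_cons]
      rw [ih _ j hrest]
      by_cases hj : p.2.length = j
      · subst hj
        simp [List.getD_eq_getElem?_getD, List.getElem?_set_self (by omega)]
      · have : (p.2.length == j) = false := by simp [hj]
        simp [List.getD_eq_getElem?_getD, List.getElem?_set_ne hj, this]

-- bridging the two break-loops: A's single loop over the concatenation
theorem hds_inner_go (ns : Int) :
    ∀ (ks res t : List String),
    hdsGoA ns (ks ++ t) res (res.length : Int)
      = (if (hdsInner ns ks res).2 then (hdsInner ns ks res).1
         else hdsGoA ns t (hdsInner ns ks res).1 (((hdsInner ns ks res).1.length : Int))) := by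
  intro ks
  induction ks with
  | nil => intro res t; simp [hdsInner]
  | cons k ks ih =>
      intro res t
      simp only [List.cons_append, hdsGoA, hdsInner]
      by_cases hge : ((res ++ [k]).length : Int) ≥ ns
      · have : (res.length : Int) + 1 ≥ ns := by simpa using hge
        simp [this]
      · have : ¬ ((res.length : Int) + 1 ≥ ns) := by simpa using hge
        have h1 : (res.length : Int) + 1 = ((res ++ [k]).length : Int) := by simp
        simp only [if_false, hge, if_false, h1]
        exact ih (res ++ [k]) t

theorem hds_outer_go (ns : Int) (buckets : List (List String)) :
    ∀ (ds : List Int) (res : List String),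
    hdsGoA ns (ds.flatMap (fun dd => PySem.List.pyGetD buckets dd [])) res (res.length : Int)
      = hdsOuter ns buckets ds res := by
  intro ds
  induction ds with
  | nil => intro res; simp [hdsGoA, hdsOuter]
  | cons dd rest ih =>
      intro res
      rw [List.flatMap_cons, hds_inner_go]
      simp only [hdsOuter]
      by_cases hdone : (hdsInner ns (PySem.List.pyGetD buckets dd []) res).2
      · simp [hdone]
      · simp only [hdone, if_false, Bool.false_eq_true]
        exact ih _

-- the two programs' central objects agree
theorem hds_main (graph : List (String × List String)) (ns n : Int) :
    highest_degree_strategy graph ns n = highest_degree_strategy_alt graph ns n := by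
  simp only [highest_degree_strategy, highest_degree_strategy_alt]
  set D := PySem.Dict.ofList graph with hD
  have hnd : D.keys.Nodup := PySem.Dict.nodup_keys_ofList graph
  have hkeys : D.keys = D.items.map (·.1) := rfl
  have hvals : D.values = D.items.map (·.2) := rfl
  set maxd := D.values.foldl (fun acc v => max acc ((v.length : Int))) 0 with hmaxd
  obtain ⟨h0, hub⟩ := PySem.List.le_foldl_max_int D.values (fun v => ((v.length : Int))) 0
  rw [← hmaxd] at h0 hub
  set buckets := D.items.foldl
      (fun bs p => bs.set p.2.length ((bs.getD p.2.length []) ++ [p.1]))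
      (List.replicate (maxd + 1).toNat []) with hbuckets
  have hitem_lt : ∀ p ∈ D.items,
      p.2.length < (List.replicate (maxd + 1).toNat ([] : List String)).length := by
    intro p hp
    have := hub p.2 (by rw [hvals]; exact List.mem_map_of_mem hp)
    simp only [List.length_replicate]
    omega
  have hbucket : ∀ dd : Int, 0 ≤ dd →
      PySem.List.pyGetD buckets dd []
        = (D.items.filter (fun p => p.2.length == dd.toNat)).map (·.1) := by
    intro dd hdd
    rw [PySem.List.pyGetD_of_nonneg _ _ hdd, hbuckets, hds_buckets_getD _ _ _ hitem_lt]
    have : (List.replicate (maxd + 1).toNat ([] : List String)).getD dd.toNat [] = [] := by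
      rw [List.getD_eq_getElem?_getD, List.getElem?_replicate]
      split <;> rfl
    rw [this, List.nil_append]
  have hf : ∀ p ∈ D.items, D.getD p.1 [] = p.2 := by
    intro p hp
    exact PySem.Dict.getD_of_mem_items D (by simpa using hp) hnd []
  have hkey : ∀ k ∈ D.keys, 0 ≤ (((D.getD k []).length : Int))
      ∧ (((D.getD k []).length : Int)) ≤ maxd := by
    intro k hk
    rw [hkeys] at hk
    rcases List.mem_map.mp hk with ⟨p, hp, rfl⟩
    rw [hf p hp]
    refine ⟨by positivity, ?_⟩
    exact hub p.2 (by rw [hvals]; exact List.mem_map_of_mem hp)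
  have hfilter : ∀ dd : Int, 0 ≤ dd →
      D.keys.filter (fun k => (((D.getD k []).length : Int)) == dd)
        = (D.items.filter (fun p => p.2.length == dd.toNat)).map (·.1) := by
    intro dd hdd
    rw [hkeys, List.filter_map]
    congr 1
    apply List.filter_congr
    intro p hp
    show ((((D.getD p.1 []).length : Int)) == dd) = (p.2.length == dd.toNat)
    rw [hf p hp]
    have hiff : (((p.2.length : Int)) = dd) ↔ (p.2.length = dd.toNat) := by omega
    by_cases h : ((p.2.length : Int)) = dd
    · simp [hiff.mp h, hdd]
    · have h2 : p.2.length ≠ dd.toNat := fun hc => h (hiff.mpr hc)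
      simp [h, h2]
  have hsorted := hds_sorted_eq_flatMap (fun k => (((D.getD k []).length : Int))) maxd h0
      D.keys hkey
  have hflat : (PySem.List.pyRange maxd (-1) (-1)).flatMap
        (fun dd => PySem.List.pyGetD buckets dd [])
      = (PySem.List.pyRange maxd (-1) (-1)).flatMap
        (fun dd => D.keys.filter (fun k => (((D.getD k []).length : Int)) == dd)) := by
    apply List.flatMap_congr
    intro dd hdd
    have h0dd : 0 ≤ dd := by
      have := PySem.List.mem_pyRange_neg_one.mp hdd
      omega
    rw [hbucket dd h0dd, hfilter dd h0dd]
  congr 1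
  rw [hsorted, ← hflat]
  exact hds_outer_go ns buckets _ []

-- ===== VERDICT (by name: the statement is the Claim_ definition above) =====
theorem highest_degree_strategy_spec : Claim_equal_highest_degree_strategy := by
  intro graph num_seeds num_rounds _
  exact hds_main graph num_seeds num_rounds
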